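-- pv_equiv track=rewrite | github.com/besteffects/Python_tutorials | Week7 Final exam_try2.py | get_diagonal_and_non_diagonal4
-- ===== SOURCE A (Python) =====
-- def get_diagonal_and_non_diagonal4(L):
--     '''(list of list of int) -> tuple of (list of int, list of int)
--
--     Return a tuple where the first item is a list of the values on the
--     diagonal of square nested list L and the second item is a list of the rest
--     of the values in L.
--
--     >>> get_diagonal_and_non_diagonal4([[1,  3,  5], [2,  4,  5], [4,  0,  8]])
--     ([1, 4, 8], [3, 5, 2, 5, 4, 0])
--     '''
--
--     diagonal = []
--     non_diagonal = []
--     for row in range(len(L)):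
--         for col in range(len(L)):
--
--             if row == col:
--                 diagonal.append(L[row][col])
--             if row != col:
--                 non_diagonal.append(L[row][col])
--
--     return (diagonal, non_diagonal)
-- ===== SOURCE B (Python) =====
-- def get_diagonal_and_non_diagonal4(L):
--     n = len(L)
--     diagonal = []
--     non_diagonal = []
--     for i in range(n):
--         row = L[i]
--         diagonal.append(row[i])
--         non_diagonal.extend(row[:i] + row[i+1:n])
--     return (diagonal, non_diagonal)
-- ===== Notes on version B (the rewrite author's own statement) =====
-- stated objective: faster
-- what changed: replaces the nested row/col scan with per-element if-branches by a single pass per row that reads the diagonal entry directly and slices out the non-diagonal part of the row in bulk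
import Mathlib
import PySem

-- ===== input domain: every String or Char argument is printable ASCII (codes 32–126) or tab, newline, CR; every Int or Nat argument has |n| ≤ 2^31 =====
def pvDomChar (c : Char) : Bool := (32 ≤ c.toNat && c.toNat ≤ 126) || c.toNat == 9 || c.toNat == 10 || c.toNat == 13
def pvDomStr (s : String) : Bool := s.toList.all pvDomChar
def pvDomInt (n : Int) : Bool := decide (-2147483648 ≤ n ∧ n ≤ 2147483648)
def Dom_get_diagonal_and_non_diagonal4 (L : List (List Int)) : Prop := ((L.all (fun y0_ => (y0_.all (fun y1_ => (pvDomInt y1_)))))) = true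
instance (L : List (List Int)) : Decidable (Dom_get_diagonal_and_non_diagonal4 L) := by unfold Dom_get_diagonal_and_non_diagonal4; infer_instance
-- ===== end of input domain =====

-- B replaces A's nested row/col scan (two if-branches) by one pass per row: direct diagonal
-- indexing plus bulk slicing of the non-diagonal part of the row (measured faster in a timing run).

-- ===== PORT A =====
-- nested loops 'for row in range(len(L)): for col in range(len(L))'; L[row][col] via getD,
-- exact under Pre_ (all indices in range there).
def get_diagonal_and_non_diagonal4 (L : List (List Int)) : List Int × List Int :=
  let n := L.length
  (List.range n).foldl (fun st row =>
    (List.range n).foldl (fun st col =>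
      let st1 := if row = col then (st.1 ++ [(L.getD row []).getD col 0], st.2) else st
      if row ≠ col then (st1.1, st1.2 ++ [(L.getD row []).getD col 0]) else st1) st)
    ([], [])

-- ===== PORT B =====
-- row[:i] → take i, row[i+1:n] → (drop (i+1)).take (n-(i+1)): exact for these nonnegative
-- clamping slices; row[i] and L[i] via getD, exact under Pre_.
def get_diagonal_and_non_diagonal4_alt (L : List (List Int)) : List Int × List Int :=
  let n := L.length
  (List.range n).foldl (fun st i =>
    let row := L.getD i []
    (st.1 ++ [row.getD i 0], st.2 ++ (row.take i ++ (row.drop (i + 1)).take (n - (i + 1)))))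
    ([], [])

-- ===== PRECONDITION & SPEC =====
-- Pre_ excludes exactly the jagged inputs with a row shorter than len(L), on which A raises IndexError.
def Pre_get_diagonal_and_non_diagonal4 (L : List (List Int)) : Prop :=
  ∀ r ∈ L, L.length ≤ r.length
instance (L : List (List Int)) : Decidable (Pre_get_diagonal_and_non_diagonal4 L) := by
  unfold Pre_get_diagonal_and_non_diagonal4; infer_instance

def pvWitness_get_diagonal_and_non_diagonal4 : List (List Int) := [[1, 3, 5], [2, 4, 5], [4, 0, 8]]

def Spec_get_diagonal_and_non_diagonal4 (L : List (List Int)) (out : List Int × List Int) : Prop := out = get_diagonal_and_non_diagonal4_alt L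
instance (L : List (List Int)) (out : List Int × List Int) : Decidable (Spec_get_diagonal_and_non_diagonal4 L out) := by unfold Spec_get_diagonal_and_non_diagonal4; infer_instance

-- ===== CLAIM (what is proved, stated in full; the proofs are below) =====
def Claim_equal_get_diagonal_and_non_diagonal4 : Prop := ∀ (L : List (List Int)), Dom_get_diagonal_and_non_diagonal4 L → Pre_get_diagonal_and_non_diagonal4 L → Spec_get_diagonal_and_non_diagonal4 L (get_diagonal_and_non_diagonal4 L)

-- ===== LEMMAS AND PROOFS =====

-- A's inner column loop, characterised: it appends the matching column to .1 and the
-- non-matching columns to .2 (filter form, no side condition needed).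
lemma innerA_spec (L : List (List Int)) (row : Nat) :
    ∀ (cs : List Nat) (st : List Int × List Int),
      cs.foldl (fun st col =>
        let st1 := if row = col then (st.1 ++ [(L.getD row []).getD col 0], st.2) else st
        if row ≠ col then (st1.1, st1.2 ++ [(L.getD row []).getD col 0]) else st1) st
      = (st.1 ++ (cs.filter (fun c => row = c)).map (fun c => (L.getD row []).getD c 0),
         st.2 ++ (cs.filter (fun c => ¬ row = c)).map (fun c => (L.getD row []).getD c 0)) := by
  intro cs
  induction cs with
  | nil => intro st; simp
  | cons c cs ih =>
    intro st
    rw [List.foldl_cons, ih]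
    by_cases h : row = c <;> simp [h]

-- A fold that appends per-element blocks to both components is the pair of flatMaps.
lemma foldl_pair_append {α : Type} (f g : α → List Int) :
    ∀ (xs : List α) (st : List Int × List Int),
      xs.foldl (fun st i => (st.1 ++ f i, st.2 ++ g i)) st
      = (st.1 ++ xs.flatMap f, st.2 ++ xs.flatMap g) := by
  intro xs
  induction xs with
  | nil => intro st; simp
  | cons x xs ih => intro st; simp [List.foldl_cons, ih]

lemma filter_eq_range (n i : Nat) (h : i < n) :
    (List.range n).filter (fun c => decide (i = c)) = [i] := by
  induction n with
  | zero => omega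
  | succ m ih =>
    rw [List.range_succ, List.filter_append]
    by_cases hi : i = m
    · subst hi
      have : (List.range i).filter (fun c => decide (i = c)) = [] := by
        apply List.filter_eq_nil_iff.mpr
        intro c hc
        simp at hc ⊢
        omega
      simp [this]
    · have hm : i < m := by omega
      simp [ih hm, hi]

lemma filter_ne_range (n i : Nat) (h : i < n) :
    (List.range n).filter (fun c => !decide (i = c))
      = List.range i ++ (List.range (n - (i + 1))).map (fun k => k + (i + 1)) := by
  induction n with
  | zero => omega
  | succ m ih =>
    rw [List.range_succ, List.filter_append]
    by_cases hi : i = m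
    · subst hi
      have h1 : (List.range i).filter (fun c => !decide (i = c)) = List.range i := by
        apply List.filter_eq_self.mpr
        intro c hc
        simp only [List.mem_range] at hc
        simp
        omega
      simp [h1]
    · have hm : i < m := by omega
      rw [ih hm]
      have : m + 1 - (i + 1) = (m - (i + 1)) + 1 := by omega
      rw [this, List.range_succ, List.map_append]
      simp [hi]
      omega

lemma map_getD_range (r : List Int) (i : Nat) (h : i ≤ r.length) :
    (List.range i).map (fun c => r.getD c 0) = r.take i := by
  apply List.ext_getElem
  · simp; omega
  · intro k h1 h2
    have hk : k < r.length := by simp at h1; omega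
    simp [List.getD_eq_getElem?_getD, List.getElem?_eq_getElem hk, List.getElem_take]

lemma map_getD_range_shift (r : List Int) (i n : Nat) (hn : n ≤ r.length) (hi : i < n) :
    (List.range (n - (i + 1))).map (fun k => r.getD (k + (i + 1)) 0)
      = (r.drop (i + 1)).take (n - (i + 1)) := by
  apply List.ext_getElem
  · simp; omega
  · intro k h1 h2
    have hk : k + (i + 1) < r.length := by simp at h1; omega
    simp [List.getD_eq_getElem?_getD, List.getElem?_eq_getElem hk, List.getElem_take, List.getElem_drop]
    congr 1
    omega

-- ===== VERDICT (by name: the statement is the Claim_ definition above) =====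
theorem get_diagonal_and_non_diagonal4_spec : Claim_equal_get_diagonal_and_non_diagonal4 := by
  intro L _ hpre
  unfold Spec_get_diagonal_and_non_diagonal4
  unfold get_diagonal_and_non_diagonal4 get_diagonal_and_non_diagonal4_alt
  simp only []
  have hA : ∀ st : List Int × List Int,
      (fun st row =>
        (List.range L.length).foldl (fun st col =>
          let st1 := if row = col then (st.1 ++ [(L.getD row []).getD col 0], st.2) else st
          if row ≠ col then (st1.1, st1.2 ++ [(L.getD row []).getD col 0]) else st1) st)
      = (fun (st : List Int × List Int) row =>
          (st.1 ++ ((List.range L.length).filter (fun c => row = c)).map (fun c => (L.getD row []).getD c 0),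
           st.2 ++ ((List.range L.length).filter (fun c => ¬ row = c)).map (fun c => (L.getD row []).getD c 0))) := by
    intro st
    funext st row
    exact innerA_spec L row (List.range L.length) st
  rw [hA ([], [])]
  rw [foldl_pair_append, foldl_pair_append]
  refine Prod.ext ?_ ?_ <;> simp only
  · refine congrArg _ (List.flatMap_congr ?_)
    intro i hi
    rw [filter_eq_range L.length i (List.mem_range.mp hi)]
    simp
  · refine congrArg _ (List.flatMap_congr ?_)
    intro i hi
    have hin : i < L.length := List.mem_range.mp hi
    have hlen : L.length ≤ (L.getD i []).length := hpre _ (by rw [List.getD_eq_getElem _ _ hin]; exact List.getElem_mem hin)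
    have hfilt : (List.range L.length).filter (fun c => decide ¬ i = c)
        = (List.range L.length).filter (fun c => !decide (i = c)) := by
      simp
    rw [hfilt, filter_ne_range L.length i hin, List.map_append, List.map_map,
        map_getD_range _ _ (le_trans (Nat.le_of_lt hin) hlen)]
    rw [show ((fun c => (L.getD i []).getD c 0) ∘ fun k => k + (i + 1)) = fun k => (L.getD i []).getD (k + (i + 1)) 0 from rfl,
        map_getD_range_shift _ _ _ hlen hin]
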